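-- pv_equiv track=rewrite | github.com/ianmoonee/WRScripts | ccn-api/hashes_generator/ccn_updater.py | _classify_dirs
-- ===== SOURCE A (Python) =====
-- def _has_code_files(filenames):
--     """Return True if any filename looks like test-procedure/test-logic code
--     (tl_*/tp_*), which distinguishes 'code' directories from auxiliary ones
--     (Makefiles, config/cdf/vm/ldra/vpx files, etc.)."""
--     for name in filenames:
--         base = name.rsplit("/", 1)[-1]
--         if base.startswith("tl_") or base.startswith("tp_"):
--             return True
--     return False
--
-- def _classify_dirs(dir_to_filenames):
--     """Split directories into (aux_dirs, code_dirs), each sorted alphabetically.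
--
--     A directory is classified as 'code' if it either contains tl_*/tp_* files
--     directly or is an ancestor of a directory that does (so higher-level
--     Makefile-only folders travel with the code they belong to).  Everything
--     else is 'aux' (cdf/, ldra/, vpx*/, vm/, hv/, etc.).
--     """
--     code_dirs = set()
--     for d, filenames in dir_to_filenames.items():
--         if _has_code_files(filenames):
--             code_dirs.add(d)
--     # Promote ancestors of code directories into the code tier.
--     for d in list(dir_to_filenames.keys()):
--         if d in code_dirs:
--             continue
--         prefix = d + "/" if d else ""
--         for cd in list(code_dirs):
--             if prefix and cd.startswith(prefix):
--                 code_dirs.add(d)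
--                 break
--
--     aux = sorted(d for d in dir_to_filenames if d not in code_dirs)
--     code = sorted(d for d in dir_to_filenames if d in code_dirs)
--     return aux, code
-- ===== SOURCE B (Python) =====
-- def _classify_dirs(dir_to_filenames):
--     """Split directories into (aux_dirs, code_dirs), each sorted alphabetically.
--
--     Alternative scheme: instead of scanning the whole code-dir set for every
--     directory, walk each code directory's path once and promote its '/'-ancestors.
--     """
--     code = {d for d, filenames in dir_to_filenames.items()
--             if any(n.rsplit("/", 1)[-1].startswith(("tl_", "tp_")) for n in filenames)}
--     promoted = set()
--     for cd in code:
--         for i, ch in enumerate(cd):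
--             if ch == "/" and i > 0:
--                 promoted.add(cd[:i])
--     code_all = code | promoted
--     aux = sorted(d for d in dir_to_filenames if d not in code_all)
--     codes = sorted(d for d in dir_to_filenames if d in code_all)
--     return aux, codes
-- ===== Notes on version B (the rewrite author's own statement) =====
-- stated objective: alternative
-- what changed: A promotes ancestors by testing every directory against every member of the growing code-dir set (re-deriving transitive promotions from that set); B instead walks each code directory's path once, emitting every '/'-cut ancestor prefix into a set, then classifies keys by one membership test; on the generated inputs both run at the same measured speed.
import Mathlib
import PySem

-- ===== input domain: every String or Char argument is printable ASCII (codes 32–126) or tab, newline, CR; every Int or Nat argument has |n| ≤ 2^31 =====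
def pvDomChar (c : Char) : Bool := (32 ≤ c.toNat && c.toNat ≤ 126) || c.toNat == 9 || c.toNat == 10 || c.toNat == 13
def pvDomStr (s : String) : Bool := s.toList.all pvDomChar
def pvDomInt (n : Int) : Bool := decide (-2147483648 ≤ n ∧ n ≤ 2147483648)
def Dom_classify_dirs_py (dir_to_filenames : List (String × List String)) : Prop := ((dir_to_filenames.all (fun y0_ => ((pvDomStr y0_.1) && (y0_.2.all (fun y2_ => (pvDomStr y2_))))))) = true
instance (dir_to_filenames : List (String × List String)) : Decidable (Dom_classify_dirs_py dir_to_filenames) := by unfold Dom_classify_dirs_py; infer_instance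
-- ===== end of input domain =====

-- B replaces A's "scan the whole code-dir set for every directory" promotion by a single walk
-- over each code directory's own '/'-split ancestors; same return value (objective: alternative).

-- ===== PORT A =====
-- hand port of name.rsplit("/", 1)[-1]: the suffix after the last '/' (the whole string when '/'
-- is absent) — exact, since rsplit with maxsplit=1 cuts at the last '/' and [-1] takes that suffix
def pvBaseName (name : String) : List Char :=
  (name.toList.reverse.takeWhile (fun c => c != '/')).reverse

def pvHasCodeFiles : List String → Bool
  | [] => false
  | name :: rest =>
    if PySem.Chars.startswith (pvBaseName name) "tl_".toList
        || PySem.Chars.startswith (pvBaseName name) "tp_".toList then true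
    else pvHasCodeFiles rest

-- body of A's promotion loop over list(dir_to_filenames.keys())
def pvStepA (s : PySem.Set String) (dd : String) : PySem.Set String :=
  if PySem.Set.contains s dd then s
  else if !(dd == "") && s.any (fun cd => PySem.Chars.startswith cd.toList (dd.toList ++ ['/'])) then
    PySem.Set.add s dd
  else s

def classify_dirs_py (dir_to_filenames : List (String × List String)) : List String × List String :=
  let d := PySem.Dict.ofList dir_to_filenames
  let code_dirs : PySem.Set String :=
    d.items.foldl (fun s p => if pvHasCodeFiles p.2 then PySem.Set.add s p.1 else s) PySem.Set.empty
  let code_dirs2 : PySem.Set String := d.keys.foldl pvStepA code_dirs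
  (PySem.List.sorted (d.keys.filter (fun x => !(PySem.Set.contains code_dirs2 x))) id,
   PySem.List.sorted (d.keys.filter (fun x => PySem.Set.contains code_dirs2 x)) id)

-- ===== PORT B =====
def pvLooksCode (n : String) : Bool :=
  PySem.Chars.startswith (pvBaseName n) "tl_".toList
    || PySem.Chars.startswith (pvBaseName n) "tp_".toList

-- body of B's inner loop over enumerate(cd); cd[:i] is Chars.slice
def pvAncStep (cd : String) (s : PySem.Set String) (q : Int × Char) : PySem.Set String :=
  if q.2 == '/' && decide (0 < q.1) then
    PySem.Set.add s (String.ofList (PySem.Chars.slice cd.toList none (some q.1)))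
  else s

def classify_dirs_py_alt (dir_to_filenames : List (String × List String)) : List String × List String :=
  let d := PySem.Dict.ofList dir_to_filenames
  let code : PySem.Set String :=
    PySem.Set.ofList ((d.items.filter (fun p => p.2.any pvLooksCode)).map (fun p => p.1))
  let promoted : PySem.Set String :=
    code.foldl (fun s cd => (PySem.List.enumerate cd.toList).foldl (pvAncStep cd) s) PySem.Set.empty
  let code_all := PySem.Set.union code promoted
  (PySem.List.sorted (d.keys.filter (fun x => !(PySem.Set.contains code_all x))) id,
   PySem.List.sorted (d.keys.filter (fun x => PySem.Set.contains code_all x)) id)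

-- ===== PRECONDITION & SPEC =====
def Spec_classify_dirs_py (dir_to_filenames : List (String × List String)) (out : List String × List String) : Prop := out = classify_dirs_py_alt dir_to_filenames
instance (dir_to_filenames : List (String × List String)) (out : List String × List String) : Decidable (Spec_classify_dirs_py dir_to_filenames out) := by unfold Spec_classify_dirs_py; infer_instance

-- ===== CLAIM (what is proved, stated in full; the proofs are below) =====
def Claim_equal_classify_dirs_py : Prop := ∀ (dir_to_filenames : List (String × List String)), Dom_classify_dirs_py dir_to_filenames → Spec_classify_dirs_py dir_to_filenames (classify_dirs_py dir_to_filenames)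

-- ===== LEMMAS AND PROOFS =====

theorem pvHasCode_eq_any (l : List String) : pvHasCodeFiles l = l.any pvLooksCode := by
  induction l with
  | nil => rfl
  | cons n rest ih => simp [pvHasCodeFiles, pvLooksCode, List.any_cons, ih]

-- A's first loop builds exactly B's base code set
theorem pvCode0_eq (items : List (String × List String)) :
    items.foldl (fun s p => if pvHasCodeFiles p.2 then PySem.Set.add s p.1 else s) PySem.Set.empty
      = PySem.Set.ofList ((items.filter (fun p => p.2.any pvLooksCode)).map (fun p => p.1)) := by
  simp only [pvHasCode_eq_any]
  rw [PySem.List.foldl_if_eq_foldl_filter (fun p : String × List String => p.2.any pvLooksCode)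
        (fun s p => PySem.Set.add s p.1),
      ← PySem.Set.update_map_eq_foldl_add, PySem.Set.update_empty]

-- the ancestors B collects from one code dir cd
def pvAncList (cd : String) : List String :=
  ((PySem.List.enumerate cd.toList).filter (fun q => q.2 == '/' && decide (0 < q.1))).map
    (fun q => String.ofList (PySem.Chars.slice cd.toList none (some q.1)))

theorem pvInner_eq (cd : String) (s : PySem.Set String) :
    (PySem.List.enumerate cd.toList).foldl (pvAncStep cd) s = PySem.Set.update s (pvAncList cd) := by
  show (PySem.List.enumerate cd.toList).foldl
      (fun s q => if q.2 == '/' && decide (0 < q.1) then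
          PySem.Set.add s (String.ofList (PySem.Chars.slice cd.toList none (some q.1))) else s) s = _
  rw [PySem.List.foldl_if_eq_foldl_filter (fun q : Int × Char => q.2 == '/' && decide (0 < q.1))
        (fun s q => PySem.Set.add s (String.ofList (PySem.Chars.slice cd.toList none (some q.1)))),
      ← PySem.Set.update_map_eq_foldl_add]
  rfl

theorem pvFoldl_update_eq (l : List String) (f : String → List String) (s : PySem.Set String) :
    l.foldl (fun s cd => PySem.Set.update s (f cd)) s = PySem.Set.update s (l.flatMap f) := by
  induction l generalizing s with
  | nil => simp [PySem.Set.update_nil]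
  | cons cd l ih => simp only [List.foldl_cons, List.flatMap_cons, PySem.Set.update_append, ih]

-- membership in B's ancestor list is exactly A's "d + '/' is a prefix of cd" test
theorem pvAnc_iff (x cd : String) :
    x ∈ pvAncList cd ↔ (x ≠ "" ∧ (x.toList ++ ['/']) <+: cd.toList) := by
  unfold pvAncList
  simp only [List.mem_map, List.mem_filter, PySem.List.mem_enumerate_iff]
  constructor
  · rintro ⟨q, ⟨⟨k, hk, rfl⟩, hq⟩, rfl⟩
    simp only [Bool.and_eq_true, beq_iff_eq, decide_eq_true_eq, zero_add] at hq
    obtain ⟨hsl, hpos⟩ := hq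
    have hk0 : 0 < k := by exact_mod_cast hpos
    have hslice : PySem.Chars.slice cd.toList none (some ((0:Int) + k)) = cd.toList.take k := by
      simp [PySem.List.slice_to_natCast]
    rw [hslice]
    refine ⟨?_, ?_⟩
    · intro hemp
      have h1 : (String.ofList (cd.toList.take k)).toList = ("" : String).toList := by rw [hemp]
      rw [String.toList_ofList] at h1
      have h2 : (cd.toList.take k).length = 0 := by rw [h1]; rfl
      rw [List.length_take] at h2
      omega
    · rw [String.toList_ofList]
      have htk : cd.toList.take (k+1) = cd.toList.take k ++ [cd.toList[k]] := by
        rw [List.take_add_one]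
        simp [List.getElem?_eq_getElem hk]
      have := List.take_prefix (k+1) cd.toList
      rw [htk, hsl] at this
      exact this
  · rintro ⟨hne, hpre⟩
    obtain ⟨t, ht⟩ := hpre
    rw [List.append_assoc, List.singleton_append] at ht
    have hx0 : x.toList ≠ [] := fun hemp => hne (by simpa using congrArg String.ofList hemp)
    have hk0 : 0 < x.toList.length := List.length_pos_iff.mpr hx0
    have hklt : x.toList.length < cd.toList.length := by
      rw [← ht, List.length_append, List.length_cons]; omega
    refine ⟨((0:Int) + x.toList.length, cd.toList[x.toList.length]), ⟨⟨x.toList.length, hklt, rfl⟩, ?_⟩, ?_⟩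
    · have hget : cd.toList[x.toList.length]? = some '/' := by
        rw [← ht, List.getElem?_append_right (Nat.le_refl _)]
        simp
      have hget' : cd.toList[x.toList.length] = '/' := by
        have := List.getElem?_eq_getElem hklt
        rw [this] at hget
        exact Option.some.inj hget
      simp only [Bool.and_eq_true, beq_iff_eq, decide_eq_true_eq, zero_add]
      exact ⟨hget', by exact_mod_cast hk0⟩
    · have hslice : PySem.Chars.slice cd.toList none (some ((0:Int) + x.toList.length)) = cd.toList.take x.toList.length := by
        simp [PySem.List.slice_to_natCast]
      rw [hslice, ← ht, List.take_left, String.ofList_toList]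

-- the promotion condition relative to a base code set
def pvCond (code0 : List String) (x : String) : Prop :=
  x ≠ "" ∧ ∃ cd ∈ code0, (x.toList ++ ['/']) <+: cd.toList

-- invariant characterisation of A's promotion fold
theorem pvFoldA_mem (ks : List String) (code0 : List String) (s : PySem.Set String)
    (hsub : ∀ y ∈ code0, y ∈ s)
    (hinv : ∀ y ∈ s, y ∈ code0 ∨ pvCond code0 y) (x : String) :
    x ∈ ks.foldl pvStepA s ↔ x ∈ s ∨ (x ∈ ks ∧ pvCond code0 x) := by
  induction ks generalizing s with
  | nil => simp
  | cons dd ks ih =>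
    simp only [List.foldl_cons]
    by_cases hmem : dd ∈ s
    · have hstep : pvStepA s dd = s := by
        unfold pvStepA; rw [if_pos ((PySem.Set.contains_iff s dd).mpr hmem)]
      rw [hstep, ih s hsub hinv]
      constructor
      · rintro (h | ⟨h1, h2⟩)
        · exact Or.inl h
        · exact Or.inr ⟨List.mem_cons_of_mem _ h1, h2⟩
      · rintro (h | ⟨h1, h2⟩)
        · exact Or.inl h
        · rcases List.mem_cons.mp h1 with rfl | h1
          · exact Or.inl hmem
          · exact Or.inr ⟨h1, h2⟩
    · have hcontains : PySem.Set.contains s dd = false := by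
        rw [Bool.eq_false_iff]
        intro hc
        exact hmem ((PySem.Set.contains_iff s dd).mp hc)
      have hbiff : (!(dd == "") && s.any (fun cd => PySem.Chars.startswith cd.toList (dd.toList ++ ['/']))) = true
          ↔ pvCond code0 dd := by
        simp only [Bool.and_eq_true, Bool.not_eq_eq_eq_not, Bool.not_true, beq_eq_false_iff_ne,
          ne_eq, List.any_eq_true, PySem.Chars.startswith_iff, pvCond]
        constructor
        · rintro ⟨hne, cd, hcd, hpre⟩
          refine ⟨hne, ?_⟩
          rcases hinv cd hcd with h0 | ⟨_, cd', hcd', hpre'⟩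
          · exact ⟨cd, h0, hpre⟩
          · exact ⟨cd', hcd', hpre.trans ((List.prefix_append _ _).trans hpre')⟩
        · rintro ⟨hne, cd, hcd, hpre⟩
          exact ⟨hne, cd, hsub cd hcd, hpre⟩
      by_cases hb : pvCond code0 dd
      · have hstep : pvStepA s dd = PySem.Set.add s dd := by
        
          unfold pvStepA
          rw [if_neg (by simpa using hmem), if_pos (hbiff.mpr hb)]
        rw [hstep, ih (PySem.Set.add s dd)
          (fun y hy => (PySem.Set.mem_add _ _ _).mpr (Or.inl (hsub y hy)))
          (fun y hy => by
            rcases (PySem.Set.mem_add _ _ _).mp hy with h | rfl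
            · exact hinv y h
            · exact Or.inr hb)]
        simp only [PySem.Set.mem_add, List.mem_cons]
        constructor
        · rintro ((h | rfl) | ⟨h1, h2⟩)
          · exact Or.inl h
          · exact Or.inr ⟨Or.inl rfl, hb⟩
          · exact Or.inr ⟨Or.inr h1, h2⟩
        · rintro (h | ⟨rfl | h1, h2⟩)
          · exact Or.inl (Or.inl h)
          · exact Or.inl (Or.inr rfl)
          · exact Or.inr ⟨h1, h2⟩
      · have hstep : pvStepA s dd = s := by
          unfold pvStepA
          rw [if_neg (by simpa using hmem), if_neg (fun hc => hb (hbiff.mp hc))]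
        rw [hstep, ih s hsub hinv]
        constructor
        · rintro (h | ⟨h1, h2⟩)
          · exact Or.inl h
          · exact Or.inr ⟨List.mem_cons_of_mem _ h1, h2⟩
        · rintro (h | ⟨h1, h2⟩)
          · exact Or.inl h
          · rcases List.mem_cons.mp h1 with rfl | h1
            · exact absurd h2 hb
            · exact Or.inr ⟨h1, h2⟩

-- ===== VERDICT (by name: the statement is the Claim_ definition above) =====
theorem classify_dirs_py_spec : Claim_equal_classify_dirs_py := by
  intro dtf _
  unfold Spec_classify_dirs_py classify_dirs_py classify_dirs_py_alt
  dsimp only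
  rw [pvCode0_eq]
  set keys := (PySem.Dict.ofList dtf).keys with hkeys
  set code := PySem.Set.ofList
      (((PySem.Dict.ofList dtf).items.filter (fun p => p.2.any pvLooksCode)).map (fun p => p.1)) with hcode
  have hprom : code.foldl (fun s cd => (PySem.List.enumerate cd.toList).foldl (pvAncStep cd) s)
      PySem.Set.empty = PySem.Set.update PySem.Set.empty (code.flatMap pvAncList) := by
    rw [show (fun (s : PySem.Set String) (cd : String) =>
          (PySem.List.enumerate cd.toList).foldl (pvAncStep cd) s)
        = (fun (s : PySem.Set String) (cd : String) => PySem.Set.update s (pvAncList cd)) from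
        funext fun s => funext fun cd => pvInner_eq cd s]
    exact pvFoldl_update_eq _ _ _
  rw [hprom]
  have hmemB : ∀ x : String,
      x ∈ PySem.Set.union code (PySem.Set.update PySem.Set.empty (code.flatMap pvAncList))
        ↔ x ∈ code ∨ pvCond code x := by
    intro x
    rw [PySem.Set.mem_union, PySem.Set.mem_update]
    simp only [PySem.Set.empty, List.not_mem_nil, false_or, List.mem_flatMap]
    constructor
    · rintro (h | ⟨cd, hcd, hanc⟩)
      · exact Or.inl h
      · obtain ⟨hne, hpre⟩ := (pvAnc_iff x cd).mp hanc
        exact Or.inr ⟨hne, cd, hcd, hpre⟩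
    · rintro (h | ⟨hne, cd, hcd, hpre⟩)
      · exact Or.inl h
      · exact Or.inr ⟨cd, hcd, (pvAnc_iff x cd).mpr ⟨hne, hpre⟩⟩
  have hmemA : ∀ x : String, x ∈ keys.foldl pvStepA code ↔ x ∈ code ∨ (x ∈ keys ∧ pvCond code x) :=
    pvFoldA_mem keys code code (fun _ hy => hy) (fun y hy => Or.inl hy)
  have hpt : ∀ x ∈ keys, PySem.Set.contains (keys.foldl pvStepA code) x
      = PySem.Set.contains (PySem.Set.union code (PySem.Set.update PySem.Set.empty (code.flatMap pvAncList))) x := by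
    intro x hx
    rw [Bool.eq_iff_iff]
    simp only [PySem.Set.contains_iff]
    rw [hmemA, hmemB]
    constructor
    · rintro (h | ⟨_, h2⟩)
      · exact Or.inl h
      · exact Or.inr h2
    · rintro (h | h)
      · exact Or.inl h
      · exact Or.inr ⟨hx, h⟩
  have hfilt1 : keys.filter (fun x => !(PySem.Set.contains (keys.foldl pvStepA code) x))
      = keys.filter (fun x => !(PySem.Set.contains (PySem.Set.union code (PySem.Set.update PySem.Set.empty (code.flatMap pvAncList))) x)) :=
    List.filter_congr (fun x hx => by rw [hpt x hx])
  have hfilt2 : keys.filter (fun x => PySem.Set.contains (keys.foldl pvStepA code) x)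
      = keys.filter (fun x => PySem.Set.contains (PySem.Set.union code (PySem.Set.update PySem.Set.empty (code.flatMap pvAncList))) x) :=
    List.filter_congr (fun x hx => hpt x hx)
  rw [hfilt1, hfilt2]
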